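-- pv_equiv track=rewrite | github.com/lirmag/All-works | ege_april_2var/22.py | f
-- ===== SOURCE A (Python) =====
-- def f(x):
--     S = x
--     R = 0
--     while x > 0:
--         d = x % 2
--         R = 10 * R + d
--         x = x // 2
--     S = R + S
--     return S
-- ===== SOURCE B (Python) =====
-- def f(x):
--     # reverse binary digits read as a base-10 number, added to x; x<=0: loop-free, return x
--     if x <= 0:
--         return x
--     return x + int(bin(x)[2:][::-1])
-- ===== Notes on version B (the rewrite author's own statement) =====
-- stated objective: idiomatic
-- what changed: Replaces the bit-by-bit arithmetic accumulation loop by building the binary string with bin(), reversing it, and parsing it once as a base-10 int.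
import Mathlib
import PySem

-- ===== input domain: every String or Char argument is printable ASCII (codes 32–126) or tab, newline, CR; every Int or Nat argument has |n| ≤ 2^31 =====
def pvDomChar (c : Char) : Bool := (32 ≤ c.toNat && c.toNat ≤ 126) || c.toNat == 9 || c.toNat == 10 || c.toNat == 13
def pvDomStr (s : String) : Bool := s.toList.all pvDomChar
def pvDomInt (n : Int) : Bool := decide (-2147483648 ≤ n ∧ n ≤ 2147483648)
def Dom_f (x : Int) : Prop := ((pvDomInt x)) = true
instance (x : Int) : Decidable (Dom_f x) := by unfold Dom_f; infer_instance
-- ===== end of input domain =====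

-- B builds the binary digit string and parses its reversal once, instead of A's bit-by-bit decimal accumulation loop (objective: idiomatic).

-- ===== PORT A =====
-- the while loop: state (x, R)
def fLoop (x R : Int) : Int :=
  if _h : x > 0 then
    fLoop (PySem.Int.floordiv x 2) (10 * R + PySem.Int.mod x 2)
  else R
termination_by x.toNat
decreasing_by
  rw [PySem.Int.floordiv_eq_ediv_of_pos (by omega)]
  omega

def f (x : Int) : Int := fLoop x 0 + x

-- ===== PORT B =====
-- bin(x)[2:] as the list of binary digits, most significant first
def binDigits (n : Int) : List Int :=
  if _h : n > 0 then binDigits (PySem.Int.floordiv n 2) ++ [PySem.Int.mod n 2] else []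
termination_by n.toNat
decreasing_by
  rw [PySem.Int.floordiv_eq_ediv_of_pos (by omega)]
  omega

-- int(b[::-1]): parse the reversed digit string as a base-10 number
def parseDec (ds : List Int) : Int := ds.foldl (fun a d => 10 * a + d) 0

def f_alt (x : Int) : Int :=
  if x ≤ 0 then x else x + parseDec (binDigits x).reverse

-- ===== PRECONDITION & SPEC =====
def Spec_f (x : Int) (out : Int) : Prop := out = f_alt x
instance (x : Int) (out : Int) : Decidable (Spec_f x out) := by unfold Spec_f; infer_instance

-- ===== CLAIM (what is proved, stated in full; the proofs are below) =====
def Claim_equal_f : Prop := ∀ (x : Int), Dom_f x → Spec_f x (f x)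

-- ===== LEMMAS AND PROOFS =====
theorem fLoop_eq_foldl (n R : Int) :
    fLoop n R = (binDigits n).reverse.foldl (fun a d => 10 * a + d) R := by
  by_cases h : n > 0
  · have hlt : (PySem.Int.floordiv n 2).toNat < n.toNat := by
      rw [PySem.Int.floordiv_eq_ediv_of_pos (by omega)]; omega
    rw [fLoop, binDigits]
    simp only [h, dif_pos, List.reverse_append, List.reverse_singleton,
      List.singleton_append, List.foldl_cons]
    exact fLoop_eq_foldl (PySem.Int.floordiv n 2) (10 * R + PySem.Int.mod n 2)
  · rw [fLoop, binDigits]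
    simp [h]
termination_by n.toNat

theorem f_spec : Claim_equal_f := by
  intro x _
  unfold Spec_f f f_alt
  by_cases h : x ≤ 0
  · rw [fLoop]
    simp [h, show ¬ x > 0 by omega]
  · rw [if_neg h, fLoop_eq_foldl, parseDec]
    ring
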